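-- pv_equiv track=rewrite | github.com/srwei/Personal | CS Class Relevant Projects/srwei-cs25020-spr-18/SFProblem/Part 1/sfproblem.py | get_column_length
-- ===== SOURCE A (Python) =====
-- def get_column_length(word_split):
-- 	max_col = []
-- 	for stem in word_split:
-- 		for i, sub in enumerate(stem):
-- 			if i+1 > len(max_col):
-- 				max_col.append(len(sub))
-- 			else:
-- 				if len(sub) > max_col[i]:
-- 					max_col[i] = len(sub)
-- 	max_col[0]+=1
-- 	return max_col
-- ===== SOURCE B (Python) =====
-- def get_column_length(word_split):
--     ncols = max(len(row) for row in word_split)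
--     max_col = [max(len(row[i]) for row in word_split if i < len(row))
--                for i in range(ncols)]
--     max_col[0] += 1
--     return max_col
-- ===== Notes on version B (the rewrite author's own statement) =====
-- stated objective: idiomatic
-- what changed: Replaces A's row-major incremental grow-and-update of max_col with a column-major pass: compute the number of columns, then take the max string length of each column directly via a comprehension.
import Mathlib
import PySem

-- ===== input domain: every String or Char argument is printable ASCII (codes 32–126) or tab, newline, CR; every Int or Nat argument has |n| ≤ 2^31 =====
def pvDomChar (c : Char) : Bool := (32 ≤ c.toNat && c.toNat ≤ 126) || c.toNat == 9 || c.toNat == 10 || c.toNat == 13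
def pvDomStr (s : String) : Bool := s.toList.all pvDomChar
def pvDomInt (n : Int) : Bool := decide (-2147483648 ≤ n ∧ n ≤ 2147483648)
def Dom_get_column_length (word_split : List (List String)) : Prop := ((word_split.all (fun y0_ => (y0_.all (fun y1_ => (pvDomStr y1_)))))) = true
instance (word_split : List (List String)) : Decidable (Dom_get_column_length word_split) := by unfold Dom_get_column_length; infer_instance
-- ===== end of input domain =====

-- B replaces A's row-major incremental update of max_col by a column-major pass over the columns (idiomatic, same results).

-- ===== PORT A =====
-- one step of the inner 'for i, sub in enumerate(stem)' loop
def aInner (mc : List Int) (p : Int × String) : List Int :=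
  if p.1 + 1 > (mc.length : Int) then mc ++ [PySem.Str.len p.2]
  else if PySem.Str.len p.2 > PySem.List.pyGetD mc p.1 0 then
    mc.set p.1.toNat (PySem.Str.len p.2)
  else mc

-- body of the outer 'for stem in word_split' loop
def aRow (mc : List Int) (stem : List String) : List Int :=
  (PySem.List.enumerate stem 0).foldl aInner mc

def get_column_length (word_split : List (List String)) : List Int :=
  match word_split.foldl aRow [] with
  | [] => []                    -- Python raises IndexError on max_col[0] += 1 here; excluded by Pre_
  | h :: t => (h + 1) :: t      -- max_col[0] += 1

-- ===== PORT B =====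
-- one column's max: max(len(row[i]) for row in word_split if i < len(row))
def bCol (word_split : List (List String)) (i : Int) : Int :=
  (PySem.List.max?
      ((word_split.filter (fun r => i < (r.length : Int))).map
        (fun r => PySem.Str.len (PySem.List.pyGetD r i "")))
      (fun x => x)).getD 0      -- the list is nonempty whenever 0 ≤ i < ncols, so the default is never taken

def get_column_length_alt (word_split : List (List String)) : List Int :=
  match PySem.List.max? (word_split.map (fun r => (r.length : Int))) (fun x => x) with
  | none => []                  -- Python: max() raises ValueError on empty word_split; excluded by Pre_
  | some ncols =>
    match (PySem.List.pyRange 0 ncols 1).map (bCol word_split) with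
    | [] => []                  -- Python raises IndexError on max_col[0] += 1 here; excluded by Pre_
    | h :: t => (h + 1) :: t    -- max_col[0] += 1

-- ===== PRECONDITION & SPEC =====
-- Pre_ excludes exactly the inputs on which the Python A raises IndexError (every row empty, incl. the empty list).
def Pre_get_column_length (word_split : List (List String)) : Prop :=
  (word_split.any (fun r => !r.isEmpty)) = true
instance (word_split : List (List String)) : Decidable (Pre_get_column_length word_split) := by unfold Pre_get_column_length; infer_instance
def pvWitness_get_column_length : List (List String) := [["ab", "c"], ["defg"]]

def Spec_get_column_length (word_split : List (List String)) (out : List Int) : Prop := out = get_column_length_alt word_split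
instance (word_split : List (List String)) (out : List Int) : Decidable (Spec_get_column_length word_split out) := by unfold Spec_get_column_length; infer_instance

-- ===== CLAIM (what is proved, stated in full; the proofs are below) =====
def Claim_equal_get_column_length : Prop := ∀ (word_split : List (List String)), Dom_get_column_length word_split → Pre_get_column_length word_split → Spec_get_column_length word_split (get_column_length word_split)

-- ===== LEMMAS AND PROOFS =====

-- pointwise merge of a row into the running column maxima (the semantic content of aRow)
def mergeRow : List Int → List String → List Int
  | mc, [] => mc
  | [], s :: rest => PySem.Str.len s :: mergeRow [] rest
  | m :: mc, s :: rest => max m (PySem.Str.len s) :: mergeRow mc rest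

-- option-level max
def omax : Option Int → Option Int → Option Int
  | none, b => b
  | some a, none => some a
  | some a, some b => some (max a b)

-- the column maxima, recursively over the rows
def colMax : List (List String) → Nat → Option Int
  | [], _ => none
  | r :: ws, i => omax (r[i]?.map PySem.Str.len) (colMax ws i)

theorem take_app_cons {a : Type} (A B : List a) (v : a) :
    List.take (A.length + 1) (A ++ v :: B) = A ++ [v] := by
  simp [List.take_append]

theorem drop_app_cons {a : Type} (A B : List a) (v : a) :
    List.drop (A.length + 1) (A ++ v :: B) = B := by
  simp [List.drop_append]

theorem aRow_eq_mergeRow_aux (row : List String) :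
    ∀ (mc : List Int) (k : Nat), k ≤ mc.length →
    (PySem.List.enumerate row (k : Int)).foldl aInner mc
      = mc.take k ++ mergeRow (mc.drop k) row := by
  induction row with
  | nil =>
    intro mc k hk
    simp [PySem.List.enumerate, mergeRow, List.take_append_drop]
  | cons s rest ih =>
    intro mc k hk
    rw [PySem.List.enumerate_cons]
    rcases Nat.lt_or_ge k mc.length with hlt | hge
    · -- in-range: the element is updated in place (to the max)
      have hcond : ¬ ((k : Int) + 1 > (mc.length : Int)) := by
        simp only [not_lt]; omega
      have hget : PySem.List.pyGetD mc (k : Int) 0 = mc[k] := by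
        rw [PySem.List.pyGetD_natCast, List.getD_eq_getElem _ _ hlt]
      have hstep : aInner mc ((k : Int), s) = mc.set k (max mc[k] (PySem.Str.len s)) := by
        simp only [aInner, hcond, if_false, hget, Int.toNat_natCast]
        split_ifs with h2
        · rw [max_eq_right (le_of_lt h2)]
        · rw [max_eq_left (not_lt.mp h2), List.set_getElem_self]
      have hset : mc.set k (max mc[k] (PySem.Str.len s))
          = mc.take k ++ max mc[k] (PySem.Str.len s) :: mc.drop (k + 1) :=
        List.set_eq_take_cons_drop _ hlt
      have hk' : k + 1 ≤ (mc.set k (max mc[k] (PySem.Str.len s))).length := by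
        simp; omega
      have hrec := ih (mc.set k (max mc[k] (PySem.Str.len s))) (k + 1) hk'
      rw [List.foldl_cons, hstep]
      push_cast at hrec
      rw [hrec, hset]
      have hlenA : (mc.take k).length = k := by simp [Nat.min_eq_left (le_of_lt hlt)]
      have htk := take_app_cons (mc.take k) (mc.drop (k+1)) (max mc[k] (PySem.Str.len s))
      have hdr := drop_app_cons (mc.take k) (mc.drop (k+1)) (max mc[k] (PySem.Str.len s))
      rw [hlenA] at htk hdr
      rw [htk, hdr, List.drop_eq_getElem_cons hlt]
      simp [mergeRow]
    · -- k = len(max_col): append a new column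
      have hk0 : k = mc.length := le_antisymm hk hge
      have hcond : ((k : Int) + 1 > (mc.length : Int)) := by omega
      have hstep : aInner mc ((k : Int), s) = mc ++ [PySem.Str.len s] := by
        simp [aInner, hcond]
      have hk' : k + 1 ≤ (mc ++ [PySem.Str.len s]).length := by simp; omega
      have hrec := ih (mc ++ [PySem.Str.len s]) (k + 1) hk'
      rw [List.foldl_cons, hstep]
      push_cast at hrec
      rw [hrec]
      subst hk0
      have h1 : List.take (mc.length + 1) (mc ++ [PySem.Str.len s]) = mc ++ [PySem.Str.len s] :=
        List.take_of_length_le (by simp)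
      have h2 : List.drop (mc.length + 1) (mc ++ [PySem.Str.len s]) = [] :=
        List.drop_eq_nil_iff.mpr (by simp)
      rw [h1, h2, List.take_length, List.drop_length]
      simp [mergeRow]

theorem aRow_eq_mergeRow (mc : List Int) (row : List String) :
    aRow mc row = mergeRow mc row := by
  have h := aRow_eq_mergeRow_aux row mc 0 (Nat.zero_le _)
  simpa [aRow] using h

theorem getElem?_mergeRow (mc : List Int) (row : List String) (i : Nat) :
    (mergeRow mc row)[i]? = omax mc[i]? (row[i]?.map PySem.Str.len) := by
  induction mc, row using mergeRow.induct generalizing i with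
  | case1 mc =>
    cases h : mc[i]? <;> simp [mergeRow, omax, h]
  | case2 s rest ih =>
    cases i with
    | zero => simp [mergeRow, omax]
    | succ j => simpa [mergeRow, omax] using ih j
  | case3 m mc s rest ih =>
    cases i with
    | zero => simp [mergeRow, omax]
    | succ j => simpa [mergeRow] using ih j

theorem omax_assoc (a b c : Option Int) : omax (omax a b) c = omax a (omax b c) := by
  cases a <;> cases b <;> cases c <;> simp [omax, max_assoc]

theorem getElem?_foldl_mergeRow (ws : List (List String)) :
    ∀ (mc : List Int) (i : Nat),
    (ws.foldl mergeRow mc)[i]? = omax mc[i]? (colMax ws i) := by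
  induction ws with
  | nil => intro mc i; cases h : mc[i]? <;> simp [colMax, omax, h]
  | cons r ws ih =>
    intro mc i
    rw [List.foldl_cons, ih, getElem?_mergeRow, omax_assoc, colMax]

theorem getElem?_core (ws : List (List String)) (i : Nat) :
    (ws.foldl aRow [])[i]? = colMax ws i := by
  have haa : aRow = mergeRow := funext fun mc => funext fun r => aRow_eq_mergeRow mc r
  rw [haa, getElem?_foldl_mergeRow]
  simp [omax]

theorem foldl_max_pull (x : Int) : ∀ (t : List Int) (y : Int),
    t.foldl max (max x y) = max x (t.foldl max y) := by
  intro t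
  induction t with
  | nil => intro y; rfl
  | cons z t ih =>
    intro y
    rw [List.foldl_cons, List.foldl_cons, max_assoc, ih]

-- PySem.List.max? with identity key, recursively
theorem max?_id_rec (x : Int) (l : List Int) :
    PySem.List.max? (x :: l) (fun y => y) = omax (some x) (PySem.List.max? l (fun y => y)) := by
  cases l with
  | nil =>
    rw [(PySem.List.max?_eq_none_iff ([] : List Int) (fun y => y)).mpr rfl]
    simp [PySem.List.max?_id_cons, omax]
  | cons y t =>
    rw [PySem.List.max?_id_cons, PySem.List.max?_id_cons]
    simp only [List.foldl_cons, omax]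
    rw [foldl_max_pull]

-- B's column function computes colMax (as a total value) at in-range, nonnegative columns
theorem bCol_eq_colMax (ws : List (List String)) (i : Nat) :
    (PySem.List.max?
      ((ws.filter (fun r => (i : Int) < (r.length : Int))).map
        (fun r => PySem.Str.len (PySem.List.pyGetD r (i : Int) "")))
      (fun x => x)) = colMax ws i := by
  induction ws with
  | nil => exact (PySem.List.max?_eq_none_iff _ _).mpr rfl
  | cons r ws ih =>
    by_cases h : (i : Int) < (r.length : Int)
    · have hi : i < r.length := by exact_mod_cast h
      rw [List.filter_cons_of_pos (by simpa using h), List.map_cons, max?_id_rec, ih]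
      have hget : PySem.List.pyGetD r (i : Int) "" = r[i] := by
        rw [PySem.List.pyGetD_natCast, List.getD_eq_getElem _ _ hi]
      rw [colMax, hget, List.getElem?_eq_getElem hi]
      rfl
    · have hi : ¬ i < r.length := by exact_mod_cast h
      rw [List.filter_cons_of_neg (by simpa using h), ih, colMax,
        List.getElem?_eq_none_iff.mpr (by omega)]
      rfl

theorem colMax_eq_none (ws : List (List String)) (i : Nat)
    (h : ∀ r ∈ ws, r.length ≤ i) : colMax ws i = none := by
  induction ws with
  | nil => rfl
  | cons r ws ih =>
    have hr : r.length ≤ i := h r (by simp)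
    have : r[i]? = none := by
      rw [List.getElem?_eq_none_iff]; exact hr
    simp [colMax, this, omax, ih (fun r hr => h r (by simp [hr]))]

theorem colMax_isSome (ws : List (List String)) (i : Nat)
    (h : ∃ r ∈ ws, i < r.length) : (colMax ws i).isSome := by
  obtain ⟨r, hr, hi⟩ := h
  induction ws with
  | nil => simp at hr
  | cons q ws ih =>
    rcases List.mem_cons.mp hr with h1 | h1
    · subst h1
      have : r[i]?.isSome := by simp [List.getElem?_eq_getElem hi]
      cases hq : r[i]? with
      | none => simp [hq] at this
      | some v => cases hw : colMax ws i <;> simp [colMax, hq, hw, omax]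
    · cases hq : q[i]? with
      | none => simpa [colMax, hq, omax] using ih h1
      | some v => cases hw : colMax ws i <;> simp [colMax, hq, hw, omax]

-- ===== VERDICT (by name: the statement is the Claim_ definition above) =====
theorem get_column_length_spec : Claim_equal_get_column_length := by
  intro ws _hdom hpre
  unfold Spec_get_column_length
  cases hmax : PySem.List.max? (ws.map (fun r => (r.length : Int))) (fun x => x) with
  | none =>
    exfalso
    have hnil : ws = [] := by
      simpa using (PySem.List.max?_eq_none_iff (ws.map (fun r => (r.length : Int))) (fun x => x)).mp hmax
    rw [hnil] at hpre
    simp [Pre_get_column_length] at hpre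
  | some n =>
    obtain ⟨r0, hr0, hlen0⟩ := List.mem_map.mp (PySem.List.max?_mem hmax)
    have hub : ∀ r ∈ ws, (r.length : Int) ≤ n := by
      intro r hr
      exact PySem.List.max?_isMax hmax _ (List.mem_map_of_mem hr)
    have hn0 : 0 ≤ n := by rw [← hlen0]; exact Int.natCast_nonneg _
    have hlist : ws.foldl aRow [] = (PySem.List.pyRange 0 n 1).map (bCol ws) := by
      have hnn : n = ((n.toNat : Nat) : Int) := (Int.toNat_of_nonneg hn0).symm
      apply List.ext_getElem?
      intro i
      rw [getElem?_core]
      by_cases hi : i < n.toNat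
      · rw [hnn, PySem.List.getElem?_map_pyRange_zero _ _ _ hi]
        have hir0 : i < r0.length := by omega
        have hsome : (colMax ws i).isSome := colMax_isSome ws i ⟨r0, hr0, hir0⟩
        have hb : bCol ws (i : Int) = (colMax ws i).getD 0 := by
          unfold bCol; rw [bCol_eq_colMax]
        rw [hb]
        cases hcm : colMax ws i with
        | none => rw [hcm] at hsome; simp at hsome
        | some v => rfl
      · have h1 : ((PySem.List.pyRange 0 n 1).map (bCol ws))[i]? = none := by
          rw [List.getElem?_eq_none_iff]
          simp [PySem.List.length_pyRange_one]
          omega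
        rw [h1]
        apply colMax_eq_none
        intro r hr
        have := hub r hr
        omega
    simp only [get_column_length, get_column_length_alt, hmax, hlist]
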